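-- pv_equiv track=rewrite | github.com/kadirhanpolat/pytop | src/pytop/subset_operators.py | _normalize_topology
-- ===== SOURCE A (Python) =====
-- from collections.abc import Iterable
-- from typing import Any
--
-- def _normalize_topology(topology: Iterable[Iterable[Any]]) -> list[set[Any]]:
--     normalized: list[set[Any]] = []
--     seen: set[frozenset[Any]] = set()
--     for open_set in topology:
--         as_set = frozenset(open_set)
--         if as_set not in seen:
--             seen.add(as_set)
--             normalized.append(set(as_set))
--     normalized.sort(key=lambda block: (len(block), tuple(sorted(map(repr, block)))))
--     return normalized
-- ===== SOURCE B (Python) =====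
-- def _normalize_topology(topology):
--     # sort-then-adjacent-dedup: freeze every block first, stable-sort the whole
--     # list by the same key, then keep one block per run of equal frozensets.
--     blocks = [frozenset(open_set) for open_set in topology]
--     blocks.sort(key=lambda block: (len(block), tuple(sorted(map(repr, block)))))
--     result = []
--     last = None
--     for block in blocks:
--         if last is None or block != last:
--             result.append(set(block))
--             last = block
--     return result
-- ===== Notes on version B (the rewrite author's own statement) =====
-- stated objective: alternative
-- what changed: Instead of deduplicating with a seen-set of frozensets before sorting, B freezes every block, stable-sorts the whole list by the same key, and removes duplicates in a single adjacent-equality pass over the sorted list.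
import Mathlib
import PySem

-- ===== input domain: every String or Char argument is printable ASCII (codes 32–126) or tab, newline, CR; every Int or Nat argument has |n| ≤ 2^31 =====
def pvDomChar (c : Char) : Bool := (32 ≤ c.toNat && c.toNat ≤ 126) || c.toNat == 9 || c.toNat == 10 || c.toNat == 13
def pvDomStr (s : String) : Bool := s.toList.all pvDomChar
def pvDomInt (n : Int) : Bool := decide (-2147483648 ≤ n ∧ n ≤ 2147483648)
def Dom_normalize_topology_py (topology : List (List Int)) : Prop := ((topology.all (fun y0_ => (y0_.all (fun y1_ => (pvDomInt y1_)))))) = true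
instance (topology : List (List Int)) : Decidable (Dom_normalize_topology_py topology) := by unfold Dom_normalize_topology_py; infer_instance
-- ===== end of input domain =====

-- B freezes every block, stable-sorts the full list by the same key and removes duplicates in one
-- adjacent-equality pass, instead of A's seen-set dedup before sorting (alternative decomposition).


-- the sort key 'tuple(sorted(map(repr, block)))' shared verbatim by both Pythons
def reprKey (block : List Int) : List String :=
  PySem.List.sorted (block.map PySem.Int.toStr) (fun s => s)

-- ===== PORT A =====
-- Python's 'seen' is a set of frozensets consumed only by membership tests, so it is modelled as
-- the list of distinct blocks in first-insertion order with membership = frozenset equality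
-- (PySem.Set.equal); 'normalized.append(set(as_set))' appends the same distinct-element block.
def normalize_topology_py (topology : List (List Int)) : List (List Int) :=
  let st := topology.foldl
    (fun (st : List (List Int) × List (List Int)) open_set =>
      let as_set : PySem.Set Int := PySem.Set.ofList open_set
      if st.2.any (fun s => PySem.Set.equal s as_set) then st
      else (st.1 ++ [as_set], st.2 ++ [as_set]))
    ([], [])
  PySem.List.sorted2 st.1 (fun block => block.length) reprKey

-- ===== PORT B =====
def pyDedupAdj (last : List Int) : List (List Int) → List (List Int)
  | [] => []
  | block :: rest =>
    if PySem.Set.equal block last then pyDedupAdj last rest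
    else block :: pyDedupAdj block rest

def normalize_topology_py_alt (topology : List (List Int)) : List (List Int) :=
  let blocks := topology.map (fun open_set => PySem.Set.ofList open_set)
  let sortedBlocks := PySem.List.sorted2 blocks (fun block => block.length) reprKey
  match sortedBlocks with
  | [] => []
  | first :: rest => first :: pyDedupAdj first rest

-- ===== PRECONDITION & SPEC =====
def Spec_normalize_topology_py (topology : List (List Int)) (out : List (List Int)) : Prop := out = normalize_topology_py_alt topology
instance (topology : List (List Int)) (out : List (List Int)) : Decidable (Spec_normalize_topology_py topology out) := by unfold Spec_normalize_topology_py; infer_instance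

-- ===== CLAIM (what is proved, stated in full; the proofs are below) =====
def Claim_equal_normalize_topology_py : Prop := ∀ (topology : List (List Int)), Dom_normalize_topology_py topology → Spec_normalize_topology_py topology (normalize_topology_py topology)

-- ===== LEMMAS AND PROOFS =====

-- str(n) is injective: first, Nat.toDigits 10 written through Nat.digits
theorem digitChar_inj {a b : ℕ} (ha : a < 10) (hb : b < 10) (h : Nat.digitChar a = Nat.digitChar b) : a = b := by
  interval_cases a <;> interval_cases b <;> simp_all [Nat.digitChar]

theorem digitChar_ne_dash {a : ℕ} (ha : a < 10) : Nat.digitChar a ≠ '-' := by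
  interval_cases a <;> simp [Nat.digitChar]

def rep (n : ℕ) : List Char :=
  if n = 0 then ['0'] else ((Nat.digits 10 n).map Nat.digitChar).reverse

theorem rep_small {n : ℕ} (h : n < 10) : rep n = [Nat.digitChar (n % 10)] := by
  rcases Nat.eq_zero_or_pos n with h0 | h0
  · subst h0; decide
  · have hdig : Nat.digits 10 n = [n] := by
      rw [Nat.digits_def' (by norm_num : 1 < 10) h0, Nat.div_eq_of_lt h, Nat.mod_eq_of_lt h]
      simp
    rw [rep, if_neg (by omega), hdig, Nat.mod_eq_of_lt h]
    simp

theorem toDigitsCore_eq : ∀ (f n : ℕ) (acc : List Char), n < 10 ^ (f + 1) →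
    Nat.toDigitsCore 10 (f + 1) n acc = rep n ++ acc := by
  intro f
  induction f with
  | zero =>
    intro n acc h
    rw [pow_one] at h
    have hd : n / 10 = 0 := Nat.div_eq_of_lt h
    simp [Nat.toDigitsCore, hd, rep_small h]
  | succ f ih =>
    intro n acc h
    by_cases hd : n / 10 = 0
    · have hn : n < 10 := by omega
      simp [Nat.toDigitsCore, hd, rep_small hn]
    · have hlt : n / 10 < 10 ^ (f + 1) := by
        rw [Nat.div_lt_iff_lt_mul (by norm_num)]
        calc n < 10 ^ (f + 1 + 1) := h
        _ = 10 ^ (f + 1) * 10 := by ring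
      have hn0 : n ≠ 0 := by omega
      have hrec : Nat.toDigitsCore 10 (f + 1 + 1) n acc
          = Nat.toDigitsCore 10 (f + 1) (n / 10) (Nat.digitChar (n % 10) :: acc) := by
        simp [Nat.toDigitsCore, hd]
      rw [hrec, ih _ _ hlt]
      have hdig : Nat.digits 10 n = n % 10 :: Nat.digits 10 (n / 10) :=
        Nat.digits_def' (by norm_num) (Nat.pos_of_ne_zero hn0)
      simp [rep, hn0, hd, hdig]

theorem toDigits_eq (n : ℕ) : Nat.toDigits 10 n = rep n := by
  have h : n < 10 ^ (n + 1) := by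
    calc n < 2 ^ n := Nat.lt_two_pow_self
    _ ≤ 10 ^ n := Nat.pow_le_pow_left (by norm_num) n
    _ ≤ 10 ^ (n + 1) := Nat.pow_le_pow_right (by norm_num) (by omega)
  simpa [Nat.toDigits] using toDigitsCore_eq n n [] h

theorem map_digitChar_inj : ∀ {l1 l2 : List ℕ}, (∀ x ∈ l1, x < 10) → (∀ x ∈ l2, x < 10) →
    l1.map Nat.digitChar = l2.map Nat.digitChar → l1 = l2 := by
  intro l1
  induction l1 with
  | nil => intro l2 _ _ h; cases l2 <;> simp_all
  | cons a l ih =>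
    intro l2 h1 h2 h
    cases l2 with
    | nil => simp_all
    | cons b m =>
      simp only [List.map_cons, List.cons.injEq] at h
      have := digitChar_inj (h1 a (by simp)) (h2 b (by simp)) h.1
      have := ih (fun x hx => h1 x (by simp [hx])) (fun x hx => h2 x (by simp [hx])) h.2
      simp_all

theorem rep_eq_singleton_zero {n : ℕ} (h : rep n = ['0']) : n = 0 := by
  by_contra hn
  rw [rep, if_neg hn] at h
  have h' : (Nat.digits 10 n).map Nat.digitChar = ['0'] := by
    have := congrArg List.reverse h
    simpa using this
  rcases hdig : Nat.digits 10 n with _ | ⟨d, ds⟩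
  · exact hn (Nat.digits_eq_nil_iff_eq_zero.mp hdig)
  · rw [hdig, List.map_cons] at h'
    have hds : ds = [] := by
      have ht := congrArg List.tail h'
      simp only [List.tail_cons] at ht
      exact List.map_eq_nil_iff.mp ht
    subst hds
    have hd10 : d < 10 := Nat.digits_lt_base (by norm_num) (by rw [hdig]; simp)
    have hd0 : d = 0 := digitChar_inj hd10 (by norm_num) (by simpa using h')
    have := Nat.ofDigits_digits 10 n
    rw [hdig, hd0] at this
    simp [Nat.ofDigits] at this
    exact hn this.symm

theorem rep_inj {m n : ℕ} (h : rep m = rep n) : m = n := by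
  by_cases hm : m = 0 <;> by_cases hn : n = 0
  · omega
  · subst hm
    exact absurd (rep_eq_singleton_zero (n := n) (by rw [← h]; rfl)).symm (by omega)
  · subst hn
    exact rep_eq_singleton_zero (by rw [h]; rfl)
  · simp only [rep, hm, hn] at h
    have := map_digitChar_inj (fun x hx => Nat.digits_lt_base (by norm_num) hx)
      (fun x hx => Nat.digits_lt_base (by norm_num) hx) (List.reverse_injective h)
    exact Nat.digits_inj_iff.mp this

theorem dash_not_mem_rep {n : ℕ} : '-' ∉ rep n := by
  intro hmem
  rw [rep] at hmem
  split at hmem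
  · simp at hmem
  · rw [List.mem_reverse] at hmem
    rcases List.mem_map.mp hmem with ⟨d, hd, hdc⟩
    exact digitChar_ne_dash (Nat.digits_lt_base (by norm_num) hd) hdc

theorem toChars_injective : Function.Injective PySem.Int.toChars := by
  intro m n h
  unfold PySem.Int.toChars at h
  split_ifs at h with hm hn hn
  · have h' : Nat.toDigits 10 m.natAbs = Nat.toDigits 10 n.natAbs := by
      have := congrArg List.tail h
      simpa using this
    rw [toDigits_eq, toDigits_eq] at h'
    have := rep_inj h'
    omega
  · exfalso
    have hmem : '-' ∈ Nat.toDigits 10 n.toNat := by rw [← h]; exact List.mem_cons_self ..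
    rw [toDigits_eq] at hmem
    exact dash_not_mem_rep hmem
  · exfalso
    have hmem : '-' ∈ Nat.toDigits 10 m.toNat := by rw [h]; exact List.mem_cons_self ..
    rw [toDigits_eq] at hmem
    exact dash_not_mem_rep hmem
  · rw [toDigits_eq, toDigits_eq] at h
    have := rep_inj h
    omega

theorem toStr_injective : Function.Injective PySem.Int.toStr := by
  intro m n h
  have h' := congrArg String.toList h
  rw [PySem.Int.toList_toStr, PySem.Int.toList_toStr] at h'
  exact toChars_injective h'

-- the sort key as one lexicographically ordered value
def kee (b : List Int) : Lex (ℕ × List String) := toLex (b.length, reprKey b)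

theorem kee_eq_iff {s t : List Int} :
    kee s = kee t ↔ s.length = t.length ∧ (s.map PySem.Int.toStr).Perm (t.map PySem.Int.toStr) := by
  rw [kee, kee, toLex_inj, Prod.mk.injEq, reprKey, reprKey,
    PySem.List.sorted_id_eq_sorted_id_iff_perm]

theorem equal_iff_kee {s t : List Int} (hs : s.Nodup) (ht : t.Nodup) :
    PySem.Set.equal s t = true ↔ kee s = kee t := by
  rw [PySem.Set.equal_iff, kee_eq_iff]
  constructor
  · intro h
    have hperm : s.Perm t := (List.perm_ext_iff_of_nodup hs ht).mpr h
    exact ⟨hperm.length_eq, hperm.map _⟩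
  · rintro ⟨-, hperm⟩ x
    rw [← List.mem_map_of_injective toStr_injective (l := s),
      ← List.mem_map_of_injective toStr_injective (l := t)]
    exact hperm.mem_iff

theorem before_eq (a b : List Int) :
    (decide (a.length < b.length) ||
      (!decide (b.length < a.length) && decide (reprKey a < reprKey b))) = decide (kee a < kee b) := by
  have h : kee a < kee b ↔ a.length < b.length ∨ a.length = b.length ∧ reprKey a < reprKey b :=
    Prod.Lex.toLex_lt_toLex
  by_cases h1 : a.length < b.length <;> by_cases h2 : b.length < a.length <;>
    by_cases h3 : reprKey a < reprKey b <;>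
      simp [h, h1, h2, h3] <;> omega

theorem sorted2_eq (xs : List (List Int)) :
    PySem.List.sorted2 xs (fun b => b.length) reprKey = PySem.List.sorted xs kee := by
  rw [PySem.List.sorted_eq_foldl_insertBy]
  simp only [PySem.List.sorted2, if_neg (by decide : ¬ (false = true))]
  simp only [before_eq]

theorem insertBy_nil (p : List Int → List Int → Bool) (x : List Int) :
    PySem.List.insertBy p x [] = [x] := rfl

theorem insertBy_cons (p : List Int → List Int → Bool) (x y : List Int) (ys : List (List Int)) :
    PySem.List.insertBy p x (y :: ys) = if p x y then x :: y :: ys else y :: PySem.List.insertBy p x ys := rfl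

def dkStep (acc : List (List Int)) (x : List Int) : List (List Int) :=
  if kee x ∈ acc.map kee then acc else acc ++ [x]

def adK (last : List Int) : List (List Int) → List (List Int)
  | [] => []
  | y :: ys => if kee y = kee last then adK last ys else y :: adK y ys

def adK0 : List (List Int) → List (List Int)
  | [] => []
  | x :: r => x :: adK x r

theorem G1 (x : List Int) (l : List (List Int)) (last : List Int)
    (hl : l.Pairwise (fun a b => kee a ≤ kee b))
    (hlast : ∀ y ∈ l, kee last ≤ kee y)
    (hmem : kee x = kee last ∨ kee x ∈ l.map kee) :
    adK last (PySem.List.insertBy (fun a b => decide (kee a < kee b)) x l) = adK last l := by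
  induction l generalizing last with
  | nil =>
    rcases hmem with h | h
    · simp [insertBy_nil, adK, h]
    · simp at h
  | cons y ys ih =>
    rw [insertBy_cons]
    by_cases hxy : kee x < kee y
    · rw [if_pos (by simpa using hxy)]
      have hx_last : kee x = kee last := by
        rcases hmem with h | h
        · exact h
        · exfalso
          rcases List.mem_map.mp h with ⟨z, hz, hzx⟩
          rcases List.mem_cons.mp hz with rfl | hz'
          · rw [hzx] at hxy; exact lt_irrefl _ hxy
          · have := (List.pairwise_cons.mp hl).1 z hz'
            rw [hzx] at this
            exact absurd hxy (not_lt.mpr this)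
      rw [adK, if_pos hx_last]
    · rw [if_neg (by simpa using hxy)]
      rw [adK, adK]
      have hys : ys.Pairwise (fun a b => kee a ≤ kee b) := (List.pairwise_cons.mp hl).2
      have hy_le : ∀ z ∈ ys, kee y ≤ kee z := (List.pairwise_cons.mp hl).1
      by_cases hyl : kee y = kee last
      · rw [if_pos hyl, if_pos hyl]
        refine ih _ hys (fun z hz => hyl ▸ hy_le z hz) ?_
        rcases hmem with h | h
        · exact Or.inl h
        · rcases List.mem_map.mp h with ⟨z, hz, hzx⟩
          rcases List.mem_cons.mp hz with rfl | hz'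
          · exact Or.inl (hzx ▸ hyl)
          · exact Or.inr (List.mem_map.mpr ⟨z, hz', hzx⟩)
      · rw [if_neg hyl, if_neg hyl]
        congr 1
        refine ih _ hys hy_le ?_
        rcases hmem with h | h
        · exfalso
          have h1 : kee last ≤ kee y := hlast y (by simp)
          have h2 : kee y ≤ kee x := not_lt.mp hxy
          exact hyl (le_antisymm (h ▸ h2) h1)
        · rcases List.mem_map.mp h with ⟨z, hz, hzx⟩
          rcases List.mem_cons.mp hz with rfl | hz'
          · exact Or.inl hzx.symm
          · exact Or.inr (List.mem_map.mpr ⟨z, hz', hzx⟩)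

theorem G2' (x : List Int) (l : List (List Int)) (last : List Int)
    (hl : l.Pairwise (fun a b => kee a ≤ kee b))
    (hlast : ∀ y ∈ l, kee last ≤ kee y)
    (hnot : kee x ∉ l.map kee) (hne : kee x ≠ kee last) (hge : kee last ≤ kee x) :
    adK last (PySem.List.insertBy (fun a b => decide (kee a < kee b)) x l)
      = PySem.List.insertBy (fun a b => decide (kee a < kee b)) x (adK last l) := by
  induction l generalizing last with
  | nil => simp [insertBy_nil, adK, hne]
  | cons y ys ih =>
    have hys : ys.Pairwise (fun a b => kee a ≤ kee b) := (List.pairwise_cons.mp hl).2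
    have hy_le : ∀ z ∈ ys, kee y ≤ kee z := (List.pairwise_cons.mp hl).1
    have hxy_ne : kee x ≠ kee y := fun h => hnot (List.mem_map.mpr ⟨y, by simp, h.symm⟩)
    have hnot' : kee x ∉ ys.map kee := fun h => by
      rcases List.mem_map.mp h with ⟨z, hz, hzx⟩
      exact hnot (List.mem_map.mpr ⟨z, by simp [hz], hzx⟩)
    rw [insertBy_cons]
    by_cases hxy : kee x < kee y
    · rw [if_pos (by simpa using hxy)]
      have hyl : kee y ≠ kee last := fun h => by
        have := hlast y (by simp)
        rw [h] at hxy
        exact absurd hge (not_le.mpr hxy)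
      rw [adK, adK, if_neg hne, if_neg hyl, adK, if_neg (fun h => hxy_ne h.symm),
        insertBy_cons, if_pos (by simpa using hxy)]
    · rw [if_neg (by simpa using hxy)]
      rw [adK, adK]
      by_cases hyl : kee y = kee last
      · rw [if_pos hyl, if_pos hyl]
        exact ih _ hys (fun z hz => hyl ▸ hy_le z hz) hnot' hne hge
      · rw [if_neg hyl, if_neg hyl, insertBy_cons, if_neg (by simpa using hxy)]
        congr 1
        exact ih _ hys hy_le hnot' hxy_ne (not_lt.mp hxy)

theorem I1 (x : List Int) (l : List (List Int))
    (hl : l.Pairwise (fun a b => kee a ≤ kee b)) (hmem : kee x ∈ l.map kee) :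
    adK0 (PySem.List.insertBy (fun a b => decide (kee a < kee b)) x l) = adK0 l := by
  cases l with
  | nil => simp at hmem
  | cons y ys =>
    have hys : ys.Pairwise (fun a b => kee a ≤ kee b) := (List.pairwise_cons.mp hl).2
    have hy_le : ∀ z ∈ ys, kee y ≤ kee z := (List.pairwise_cons.mp hl).1
    rw [insertBy_cons]
    by_cases hxy : kee x < kee y
    · exfalso
      rcases List.mem_map.mp hmem with ⟨z, hz, hzx⟩
      rcases List.mem_cons.mp hz with rfl | hz'
      · rw [hzx] at hxy; exact lt_irrefl _ hxy
      · have := hy_le z hz'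
        rw [hzx] at this
        exact absurd hxy (not_lt.mpr this)
    · rw [if_neg (by simpa using hxy)]
      rw [adK0, adK0]
      congr 1
      refine G1 x ys y hys hy_le ?_
      rcases List.mem_map.mp hmem with ⟨z, hz, hzx⟩
      rcases List.mem_cons.mp hz with rfl | hz'
      · exact Or.inl hzx.symm
      · exact Or.inr (List.mem_map.mpr ⟨z, hz', hzx⟩)

theorem G2 (x : List Int) (l : List (List Int))
    (hl : l.Pairwise (fun a b => kee a ≤ kee b)) (hnot : kee x ∉ l.map kee) :
    adK0 (PySem.List.insertBy (fun a b => decide (kee a < kee b)) x l)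
      = PySem.List.insertBy (fun a b => decide (kee a < kee b)) x (adK0 l) := by
  cases l with
  | nil => simp [insertBy_nil, adK0, adK]
  | cons y ys =>
    have hys : ys.Pairwise (fun a b => kee a ≤ kee b) := (List.pairwise_cons.mp hl).2
    have hy_le : ∀ z ∈ ys, kee y ≤ kee z := (List.pairwise_cons.mp hl).1
    have hxy_ne : kee x ≠ kee y := fun h => hnot (List.mem_map.mpr ⟨y, by simp, h.symm⟩)
    have hnot' : kee x ∉ ys.map kee := fun h => by
      rcases List.mem_map.mp h with ⟨z, hz, hzx⟩
      exact hnot (List.mem_map.mpr ⟨z, by simp [hz], hzx⟩)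
    rw [insertBy_cons]
    by_cases hxy : kee x < kee y
    · rw [if_pos (by simpa using hxy)]
      rw [adK0, adK0, adK, if_neg (fun h => hxy_ne h.symm), insertBy_cons,
        if_pos (by simpa using hxy)]
    · rw [if_neg (by simpa using hxy)]
      rw [adK0, adK0, insertBy_cons, if_neg (by simpa using hxy)]
      congr 1
      exact G2' x ys y hys hy_le hnot' hxy_ne (not_lt.mp hxy)

theorem dk_mem (x : List Int) : ∀ (l : List (List Int)) (acc : List (List Int)),
    (kee x ∈ (l.foldl dkStep acc).map kee) ↔ kee x ∈ acc.map kee ∨ kee x ∈ l.map kee := by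
  intro l
  induction l with
  | nil => simp
  | cons y ys ih =>
    intro acc
    rw [List.foldl_cons, ih]
    rw [dkStep]
    split
    · rename_i hy
      simp only [List.map_cons, List.mem_cons]
      constructor
      · tauto
      · rintro (h | h | h)
        · tauto
        · exact Or.inl (h ▸ hy)
        · tauto
    · simp only [List.map_append, List.mem_append, List.map_cons, List.mem_cons, List.map_nil]
      tauto

theorem main_lemma' (l : List (List Int)) :
    adK0 (PySem.List.sorted l kee) = PySem.List.sorted (l.foldl dkStep []) kee := by
  induction l using List.reverseRecOn with
  | nil => rfl
  | append_singleton l x ih =>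
    have hsort : ∀ (m : List (List Int)), PySem.List.sorted (m ++ [x]) kee
        = PySem.List.insertBy (fun a b => decide (kee a < kee b)) x (PySem.List.sorted m kee) := by
      intro m
      rw [PySem.List.sorted_eq_foldl_insertBy, PySem.List.sorted_eq_foldl_insertBy,
        List.foldl_append]
      rfl
    rw [hsort, List.foldl_append, List.foldl_cons, List.foldl_nil, dkStep]
    have hperm : ((PySem.List.sorted l kee).map kee).Perm (l.map kee) :=
      (PySem.List.sorted_perm l kee false).map kee
    by_cases hc : kee x ∈ l.map kee
    · rw [if_pos (by rw [dk_mem]; tauto)]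
      rw [I1 x _ (PySem.List.sorted_pairwise l kee) (hperm.mem_iff.mpr hc), ih]
    · rw [if_neg (by rw [dk_mem]; simp [hc])]
      rw [G2 x _ (PySem.List.sorted_pairwise l kee) (fun h => hc (hperm.mem_iff.mp h)), ih,
        hsort]

theorem pyDedupAdj_eq (l : List (List Int)) : ∀ (last : List Int),
    (∀ b ∈ l, b.Nodup) → last.Nodup → pyDedupAdj last l = adK last l := by
  induction l with
  | nil => intro last _ _; rfl
  | cons y ys ih =>
    intro last hl hlast
    have hy : y.Nodup := hl y (by simp)
    have hys : ∀ b ∈ ys, b.Nodup := fun b hb => hl b (by simp [hb])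
    rw [pyDedupAdj, adK]
    by_cases h : kee y = kee last
    · rw [if_pos ((equal_iff_kee hy hlast).mpr h), if_pos h, ih last hys hlast]
    · rw [if_neg (fun hb => h ((equal_iff_kee hy hlast).mp hb)), if_neg h, ih y hys hy]

theorem foldA (l : List (List Int)) : ∀ (acc : List (List Int)), (∀ b ∈ acc, b.Nodup) →
    l.foldl
      (fun (st : List (List Int) × List (List Int)) open_set =>
        let as_set : PySem.Set Int := PySem.Set.ofList open_set
        if st.2.any (fun s => PySem.Set.equal s as_set) then st
        else (st.1 ++ [as_set], st.2 ++ [as_set]))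
      (acc, acc)
    = ((l.map PySem.Set.ofList).foldl dkStep acc, (l.map PySem.Set.ofList).foldl dkStep acc) := by
  induction l with
  | nil => intro acc _; rfl
  | cons os l ih =>
    intro acc h
    rw [List.foldl_cons, List.map_cons, List.foldl_cons]
    have hcond : acc.any (fun s => PySem.Set.equal s (PySem.Set.ofList os)) = true
        ↔ kee (PySem.Set.ofList os) ∈ acc.map kee := by
      rw [List.any_eq_true]
      constructor
      · rintro ⟨s, hs, he⟩
        exact List.mem_map.mpr ⟨s, hs, ((equal_iff_kee (h s hs) (PySem.Set.nodup_ofList os)).mp he).symm ▸ rfl⟩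
      · intro hm
        rcases List.mem_map.mp hm with ⟨s, hs, he⟩
        exact ⟨s, hs, (equal_iff_kee (h s hs) (PySem.Set.nodup_ofList os)).mpr he⟩
    simp only [dkStep]
    by_cases hc : kee (PySem.Set.ofList os) ∈ acc.map kee
    · rw [if_pos (hcond.mpr hc), if_pos hc]
      exact ih acc h
    · rw [if_neg (fun hb => hc (hcond.mp hb)), if_neg hc]
      refine ih (acc ++ [PySem.Set.ofList os]) ?_
      intro b hb
      rcases List.mem_append.mp hb with hb' | hb'
      · exact h b hb'
      · simp only [List.mem_singleton] at hb'
        exact hb' ▸ PySem.Set.nodup_ofList os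

theorem portB_eq (topology : List (List Int)) :
    normalize_topology_py_alt topology
      = adK0 (PySem.List.sorted (topology.map PySem.Set.ofList) kee) := by
  rw [normalize_topology_py_alt]
  rw [sorted2_eq]
  rcases hs : PySem.List.sorted (topology.map PySem.Set.ofList) kee with _ | ⟨first, rest⟩
  · rfl
  · rw [adK0]
    show first :: pyDedupAdj first rest = first :: adK first rest
    congr 1
    have hmem : ∀ b ∈ first :: rest, b.Nodup := by
      intro b hb
      have hb' : b ∈ topology.map PySem.Set.ofList :=
        ((PySem.List.sorted_perm (topology.map PySem.Set.ofList) kee false).mem_iff).mp (hs ▸ hb)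
      rcases List.mem_map.mp hb' with ⟨os, _, rfl⟩
      exact PySem.Set.nodup_ofList os
    exact pyDedupAdj_eq rest first (fun b hb => hmem b (by simp [hb])) (hmem first (by simp))

theorem portA_eq (topology : List (List Int)) :
    normalize_topology_py topology
      = PySem.List.sorted ((topology.map PySem.Set.ofList).foldl dkStep []) kee := by
  rw [normalize_topology_py]
  rw [foldA topology [] (by simp), sorted2_eq]

-- ===== VERDICT (by name: the statement is the Claim_ definition above) =====
theorem normalize_topology_py_spec : Claim_equal_normalize_topology_py := by
  intro topology _
  unfold Spec_normalize_topology_py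
  rw [portA_eq, portB_eq, main_lemma']
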